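-- pv_equiv track=rewrite | github.com/BTCElectrician/ohmni-oracle-v3 | services/extraction_service.py | _prioritize_mechanical_tables
-- ===== SOURCE A (Python) =====
-- from typing import Dict, List, Any, Optional, Tuple
--
-- def _prioritize_mechanical_tables(
--     tables: List[Dict[str, Any]]
-- ) -> List[Dict[str, Any]]:
--     """Prioritize mechanical tables - equipment schedules first."""
--     # Simple heuristic - look for equipment-related terms
--     equipment_tables = []
--     other_tables = []
--
--     for table in tables:
--         content = table.get("content", "").lower()
--         if any(term in content for term in ["equipment", "hvac", "cfm", "tonnage"]):
--             equipment_tables.append(table)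
--         else:
--             other_tables.append(table)
--
--     return equipment_tables + other_tables
-- ===== SOURCE B (Python) =====
-- def _prioritize_mechanical_tables(tables):
--     """Prioritize mechanical tables - equipment schedules first."""
--     return sorted(
--         tables,
--         key=lambda table: 0 if any(
--             term in table.get("content", "").lower()
--             for term in ["equipment", "hvac", "cfm", "tonnage"]
--         ) else 1,
--     )
-- ===== Notes on version B (the rewrite author's own statement) =====
-- stated objective: idiomatic
-- what changed: Replaced the two-accumulator partition loop with a single stable sort keyed 0 for equipment-related tables and 1 otherwise; stability preserves each group's relative order.
import Mathlib
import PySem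

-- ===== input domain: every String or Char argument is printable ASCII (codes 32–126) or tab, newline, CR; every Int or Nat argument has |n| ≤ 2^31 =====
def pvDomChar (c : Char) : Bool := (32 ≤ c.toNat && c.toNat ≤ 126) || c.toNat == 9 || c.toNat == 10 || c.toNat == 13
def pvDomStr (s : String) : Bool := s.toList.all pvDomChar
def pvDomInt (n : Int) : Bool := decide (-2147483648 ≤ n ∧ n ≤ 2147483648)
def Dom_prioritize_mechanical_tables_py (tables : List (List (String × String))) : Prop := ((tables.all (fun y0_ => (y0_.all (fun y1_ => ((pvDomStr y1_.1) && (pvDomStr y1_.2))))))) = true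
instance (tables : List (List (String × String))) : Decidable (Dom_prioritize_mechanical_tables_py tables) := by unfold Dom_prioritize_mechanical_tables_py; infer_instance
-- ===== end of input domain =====

-- B replaces A's two-list partition loop with one stable sort on a 0/1 key (idiomatic; same result).

-- ===== PORT A =====
-- 'any(term in table.get("content","").lower() for term in [...])'
def pvIsEquipA (table : List (String × String)) : Bool :=
  let content := PySem.Str.lower (PySem.Dict.getD (PySem.Dict.mk table) "content" "")
  (["equipment", "hvac", "cfm", "tonnage"] : List String).any (fun term => PySem.Str.isIn term content)

def prioritize_mechanical_tables_py (tables : List (List (String × String))) : List (List (String × String)) :=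
  let p := tables.foldl
    (fun (acc : List (List (String × String)) × List (List (String × String))) table =>
      if pvIsEquipA table then (acc.1 ++ [table], acc.2) else (acc.1, acc.2 ++ [table]))
    ([], [])
  p.1 ++ p.2

-- ===== PORT B =====
-- the sort key: 0 if equipment-related else 1
def pvKeyB (table : List (String × String)) : Int :=
  if (["equipment", "hvac", "cfm", "tonnage"] : List String).any
      (fun term => PySem.Str.isIn term (PySem.Str.lower (PySem.Dict.getD (PySem.Dict.mk table) "content" "")))
  then 0 else 1

def prioritize_mechanical_tables_py_alt (tables : List (List (String × String))) : List (List (String × String)) :=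
  PySem.List.sorted tables pvKeyB false

-- ===== PRECONDITION & SPEC =====
def Spec_prioritize_mechanical_tables_py (tables : List (List (String × String))) (out : List (List (String × String))) : Prop := out = prioritize_mechanical_tables_py_alt tables
instance (tables : List (List (String × String))) (out : List (List (String × String))) : Decidable (Spec_prioritize_mechanical_tables_py tables out) := by unfold Spec_prioritize_mechanical_tables_py; infer_instance

-- ===== CLAIM (what is proved, stated in full; the proofs are below) =====
def Claim_equal_prioritize_mechanical_tables_py : Prop := ∀ (tables : List (List (String × String))), Dom_prioritize_mechanical_tables_py tables → Spec_prioritize_mechanical_tables_py tables (prioritize_mechanical_tables_py tables)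

-- ===== LEMMAS AND PROOFS =====

theorem pvKeyB_eq (t : List (String × String)) : pvKeyB t = if pvIsEquipA t then 0 else 1 := rfl

-- stable insertion of a key-0 element lands between the key-0 block and the key-1 block
theorem insertBy_mid {α : Type} (before : α → α → Bool) (x : α) (E O : List α)
    (hE : ∀ y ∈ E, before x y = false) (hO : ∀ y ∈ O, before x y = true) :
    PySem.List.insertBy before x (E ++ O) = E ++ x :: O := by
  induction E with
  | nil =>
    cases O with
    | nil => rfl
    | cons y ys => simp [PySem.List.insertBy, hO y (List.mem_cons_self)]
  | cons e E ih =>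
    simp only [List.cons_append, PySem.List.insertBy, hE e List.mem_cons_self]
    simp only [Bool.false_eq_true, if_false]
    rw [ih (fun y hy => hE y (List.mem_cons_of_mem _ hy))]

-- A's partition loop, with general accumulators
theorem foldlA_eq (l : List (List (String × String)))
    (a b : List (List (String × String))) :
    l.foldl
      (fun (acc : List (List (String × String)) × List (List (String × String))) table =>
        if pvIsEquipA table then (acc.1 ++ [table], acc.2) else (acc.1, acc.2 ++ [table]))
      (a, b)
    = (a ++ l.filter pvIsEquipA, b ++ l.filter (fun t => !pvIsEquipA t)) := by
  induction l generalizing a b with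
  | nil => simp
  | cons x t ih =>
    by_cases hx : pvIsEquipA x = true
    · simp [List.foldl_cons, hx, ih]
    · simp only [Bool.not_eq_true] at hx
      simp [List.foldl_cons, hx, ih]

-- B's stable insertion sort keeps key-0 elements (in order) before key-1 elements (in order)
theorem foldlB_eq (l E O : List (List (String × String)))
    (hE : ∀ y ∈ E, pvIsEquipA y = true) (hO : ∀ y ∈ O, pvIsEquipA y = false) :
    l.foldl (fun acc x => PySem.List.insertBy (fun a b => decide (pvKeyB a < pvKeyB b)) x acc) (E ++ O)
    = (E ++ l.filter pvIsEquipA) ++ (O ++ l.filter (fun t => !pvIsEquipA t)) := by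
  induction l generalizing E O with
  | nil => simp
  | cons x t ih =>
    rw [List.foldl_cons]
    by_cases hx : pvIsEquipA x = true
    · rw [insertBy_mid _ x E O
        (fun y hy => by simp [pvKeyB_eq, hx, hE y hy])
        (fun y hy => by simp [pvKeyB_eq, hx, hO y hy])]
      have := ih (E ++ [x]) O
        (fun y hy => by
          rcases List.mem_append.1 hy with h | h
          · exact hE y h
          · simpa [List.mem_singleton.1 h] using hx) hO
      rw [List.append_cons E x O, this]
      simp [hx]
    · simp only [Bool.not_eq_true] at hx
      rw [PySem.List.insertBy_of_forall_not_before _ x (E ++ O)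
        (fun y hy => by
          simp only [pvKeyB_eq, hx, Bool.false_eq_true, if_false]
          split_ifs <;> decide)]
      rw [List.append_assoc]
      have := ih E (O ++ [x]) hE
        (fun y hy => by
          rcases List.mem_append.1 hy with h | h
          · exact hO y h
          · simpa [List.mem_singleton.1 h] using hx)
      rw [this]
      simp [hx]

-- ===== VERDICT (by name: the statement is the Claim_ definition above) =====
theorem prioritize_mechanical_tables_py_spec : Claim_equal_prioritize_mechanical_tables_py := by
  intro tables _
  show prioritize_mechanical_tables_py tables = prioritize_mechanical_tables_py_alt tables
  unfold prioritize_mechanical_tables_py prioritize_mechanical_tables_py_alt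
  rw [PySem.List.sorted_eq_foldl_insertBy]
  have hB := foldlB_eq tables [] [] (by simp) (by simp)
  simp only [List.nil_append] at hB
  rw [hB, foldlA_eq]
  simp
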